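-- pv_equiv track=rewrite | github.com/windnery/erAL | src/eral/ui/cli.py | _palam_level
-- ===== SOURCE A (Python) =====
-- _PALAM_LV = (0, 100, 500, 1500, 3000, 6000, 10000, 15000, 25000)
--
-- def _palam_level(value: int) -> tuple[int, int, int]:
--     """Return (level, progress_in_level, threshold_for_next)."""
--     lv = 0
--     for i in range(len(_PALAM_LV) - 1, -1, -1):
--         if value >= _PALAM_LV[i]:
--             lv = i
--             break
--     if lv >= len(_PALAM_LV) - 1:
--         return lv, 0, 0
--     return lv, value - _PALAM_LV[lv], _PALAM_LV[lv + 1] - _PALAM_LV[lv]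
-- ===== SOURCE B (Python) =====
-- _PALAM_LV = (0, 100, 500, 1500, 3000, 6000, 10000, 15000, 25000)
--
-- def _palam_level(value: int) -> tuple[int, int, int]:
--     """Return (level, progress_in_level, threshold_for_next)."""
--     # binary search (bisect_right by hand) over the sorted thresholds
--     lo, hi = 0, len(_PALAM_LV)
--     while lo < hi:
--         mid = (lo + hi) // 2
--         if value < _PALAM_LV[mid]:
--             hi = mid
--         else:
--             lo = mid + 1
--     lv = max(0, lo - 1)
--     if lv == len(_PALAM_LV) - 1:
--         return lv, 0, 0
--     return lv, value - _PALAM_LV[lv], _PALAM_LV[lv + 1] - _PALAM_LV[lv]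
-- ===== Notes on version B (the rewrite author's own statement) =====
-- stated objective: idiomatic
-- what changed: Replaces the reverse linear scan for the bracket index with a bisect_right-style binary search over the sorted thresholds (clamped with max(0, lo-1)), keeping the tail arithmetic.
import Mathlib
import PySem

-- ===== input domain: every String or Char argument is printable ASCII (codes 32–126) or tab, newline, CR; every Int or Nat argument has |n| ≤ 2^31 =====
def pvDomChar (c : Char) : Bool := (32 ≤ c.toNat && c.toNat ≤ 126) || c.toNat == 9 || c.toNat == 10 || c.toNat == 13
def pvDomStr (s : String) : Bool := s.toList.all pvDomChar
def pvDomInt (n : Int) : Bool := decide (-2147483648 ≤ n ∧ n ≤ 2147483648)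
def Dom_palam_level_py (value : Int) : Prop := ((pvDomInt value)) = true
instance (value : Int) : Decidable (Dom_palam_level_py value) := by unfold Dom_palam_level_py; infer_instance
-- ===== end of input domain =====

-- B replaces A's reverse linear scan with a binary search for the bracket index; same outputs.

-- the module constant _PALAM_LV
def palamLv : List Int := [0, 100, 500, 1500, 3000, 6000, 10000, 15000, 25000]

-- _PALAM_LV[i] (always in range at every call site below)
def palamGet (i : Int) : Int := (PySem.List.pyGet? palamLv i).getD 0

-- ===== PORT A =====
-- the 'for i in range(len(_PALAM_LV)-1, -1, -1): if value >= _PALAM_LV[i]: lv = i; break' loop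
def palamLoopA : List Int → Int → Int
  | [], _ => 0
  | i :: rest, value => if value ≥ palamGet i then i else palamLoopA rest value

def palam_level_py (value : Int) : Int × Int × Int :=
  let lv := palamLoopA (PySem.List.pyRange 8 (-1) (-1)) value
  if lv ≥ 8 then (lv, 0, 0)
  else (lv, value - palamGet lv, palamGet (lv + 1) - palamGet lv)

-- ===== PORT B =====
-- the hand-written bisect_right loop: while lo < hi: …
def bisectR (value : Int) (lo hi : Nat) : Nat :=
  if h : lo < hi then
    let mid := (lo + hi) / 2
    if value < palamGet (mid : Int) then bisectR value lo mid
    else bisectR value (mid + 1) hi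
  else lo
termination_by hi - lo
decreasing_by all_goals omega

def palam_level_py_alt (value : Int) : Int × Int × Int :=
  let lo := bisectR value 0 9
  let lv : Int := max 0 ((lo : Int) - 1)
  if lv = 8 then (lv, 0, 0)
  else (lv, value - palamGet lv, palamGet (lv + 1) - palamGet lv)

-- ===== PRECONDITION & SPEC =====
def Spec_palam_level_py (value : Int) (out : Int × Int × Int) : Prop := out = palam_level_py_alt value
instance (value : Int) (out : Int × Int × Int) : Decidable (Spec_palam_level_py value out) := by unfold Spec_palam_level_py; infer_instance

-- ===== CLAIM (what is proved, stated in full; the proofs are below) =====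
def Claim_equal_palam_level_py : Prop := ∀ (value : Int), Dom_palam_level_py value → Spec_palam_level_py value (palam_level_py value)

-- ===== LEMMAS AND PROOFS =====
theorem pyRangeEq : PySem.List.pyRange 8 (-1) (-1) = [8, 7, 6, 5, 4, 3, 2, 1, 0] := by decide

-- one-step unfoldings of the binary search at each node it can reach from (0, 9)
theorem bbase (v : Int) (k : Nat) : bisectR v k k = k := by rw [bisectR]; simp

theorem n09 (v : Int) : bisectR v 0 9 = if v < 3000 then bisectR v 0 4 else bisectR v 5 9 := by
  rw [bisectR]; norm_num; rw [show palamGet 4 = 3000 from by decide]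
theorem n04 (v : Int) : bisectR v 0 4 = if v < 500 then bisectR v 0 2 else bisectR v 3 4 := by
  rw [bisectR]; norm_num; rw [show palamGet 2 = 500 from by decide]
theorem n59 (v : Int) : bisectR v 5 9 = if v < 15000 then bisectR v 5 7 else bisectR v 8 9 := by
  rw [bisectR]; norm_num; rw [show palamGet 7 = 15000 from by decide]
theorem n02 (v : Int) : bisectR v 0 2 = if v < 100 then bisectR v 0 1 else bisectR v 2 2 := by
  rw [bisectR]; norm_num; rw [show palamGet 1 = 100 from by decide]
theorem n34 (v : Int) : bisectR v 3 4 = if v < 1500 then bisectR v 3 3 else bisectR v 4 4 := by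
  rw [bisectR]; norm_num; rw [show palamGet 3 = 1500 from by decide]
theorem n57 (v : Int) : bisectR v 5 7 = if v < 10000 then bisectR v 5 6 else bisectR v 7 7 := by
  rw [bisectR]; norm_num; rw [show palamGet 6 = 10000 from by decide]
theorem n89 (v : Int) : bisectR v 8 9 = if v < 25000 then bisectR v 8 8 else bisectR v 9 9 := by
  rw [bisectR]; norm_num; rw [show palamGet 8 = 25000 from by decide]
theorem n01 (v : Int) : bisectR v 0 1 = if v < 0 then bisectR v 0 0 else bisectR v 1 1 := by
  rw [bisectR]; norm_num; rw [show palamGet 0 = 0 from by decide]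
theorem n56 (v : Int) : bisectR v 5 6 = if v < 6000 then bisectR v 5 5 else bisectR v 6 6 := by
  rw [bisectR]; norm_num; rw [show palamGet 5 = 6000 from by decide]

-- ===== VERDICT (by name: the statement is the Claim_ definition above) =====
set_option maxHeartbeats 2000000 in
theorem palam_level_py_spec : Claim_equal_palam_level_py := by
  intro v _
  unfold Spec_palam_level_py palam_level_py palam_level_py_alt
  rw [pyRangeEq]
  simp only [palamLoopA, n09, n04, n59, n02, n34, n57, n89, n01, n56, bbase]
  rw [show palamGet 8 = 25000 from by decide, show palamGet 7 = 15000 from by decide,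
      show palamGet 6 = 10000 from by decide, show palamGet 5 = 6000 from by decide,
      show palamGet 4 = 3000 from by decide, show palamGet 3 = 1500 from by decide,
      show palamGet 2 = 500 from by decide, show palamGet 1 = 100 from by decide,
      show palamGet 0 = 0 from by decide]
  split_ifs <;>
    norm_num [Prod.mk.injEq, palamGet, palamLv, PySem.List.pyGet?, PySem.List.pyIdx?] <;>
    omega
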